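-- pv_equiv track=rewrite | github.com/saudadez21/novel-downloader | src/novel_downloader/libs/mini_js/tokenizer.py | _read_ident
-- ===== SOURCE A (Python) =====
-- _DIGIT = tuple(chr(i).isdigit() for i in range(128))
--
-- _UPPER = tuple("A" <= chr(i) <= "Z" for i in range(128))
--
-- _LOWER = tuple("a" <= chr(i) <= "z" for i in range(128))
--
-- def _is_hex(ch: str) -> bool:
--     o = ord(ch)
--     return (48 <= o <= 57) or (65 <= o <= 70) or (97 <= o <= 102)
--
-- def _is_ident_part_fast(ch: str) -> bool:
--     oc = ord(ch)
--     if oc < 128: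
--         return _UPPER[oc] or _LOWER[oc] or _DIGIT[oc] or ch in ("_", "$")
--     return False
--
-- def _read_ident(code: str, i: int, n: int) -> tuple[str, int]:
--     """Read identifier with ASCII fast path + \\uXXXX escapes."""
--     j = i
--     while j < n:
--         ch = code[j]
--         if ch == "\\":
--             # \uXXXX
--             if (
--                 j + 5 < n
--                 and code[j + 1] == "u"
--                 and all(_is_hex(c) for c in code[j + 2 : j + 6])
--             ):
--                 j += 6
--                 continue
--             break
--         if not _is_ident_part_fast(ch):
--             break
--         j += 1
--     return code[i:j], j
-- ===== SOURCE B (Python) =====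
-- import re
--
-- # One anchored regex does the whole scan: an identifier is a (possibly empty)
-- # run of ASCII ident chars and \uXXXX escapes; match(code, i, n) starts at i
-- # and never looks past n.
-- _IDENT_RE = re.compile(r'(?:[A-Za-z0-9_$]|\\u[0-9A-Fa-f]{4})*')
--
--
-- def _read_ident(code: str, i: int, n: int) -> "tuple[str, int]":
--     if n <= i:  # empty scan window (re.match would clamp the positions)
--         return "", i
--     j = _IDENT_RE.match(code, i, n).end()
--     return code[i:j], j
-- ===== Notes on version B (the rewrite author's own statement) =====
-- stated objective: idiomatic
-- what changed: Replaces the hand-written pointer-advancing while-loop (with its manual escape lookahead) by a single anchored match of a precompiled regex whose end() is the identifier boundary, plus an explicit empty-window early return.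
-- outside the precondition, e.g. on _read_ident('ab!', -3, -1): A returns ('ab', -1), B returns ('', 0); on _read_ident('a!', 0, 5): A returns ('a', 1), B returns ('a', 1); on _read_ident('ab', 0, 5): A raises IndexError, B returns ('ab', 2)
import Mathlib
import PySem

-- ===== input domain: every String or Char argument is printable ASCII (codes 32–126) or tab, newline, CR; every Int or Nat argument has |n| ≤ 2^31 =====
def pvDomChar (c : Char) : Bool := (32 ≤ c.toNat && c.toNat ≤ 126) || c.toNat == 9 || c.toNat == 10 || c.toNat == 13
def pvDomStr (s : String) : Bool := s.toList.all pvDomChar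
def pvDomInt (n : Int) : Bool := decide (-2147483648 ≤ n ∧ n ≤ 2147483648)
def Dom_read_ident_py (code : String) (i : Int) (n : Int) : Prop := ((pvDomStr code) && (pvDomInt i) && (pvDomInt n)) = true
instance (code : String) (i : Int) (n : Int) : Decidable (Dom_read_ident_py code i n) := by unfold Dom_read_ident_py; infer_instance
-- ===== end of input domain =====

-- B replaces A's hand-written scanning loop by one anchored regex match (ported here as the
-- regex engine's greedy bounded scan); equivalence is about the return value only.

-- ===== PORT A =====

-- _is_hex(ch)
def isHexA (c : Char) : Bool :=
  let o := c.toNat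
  (48 ≤ o && o ≤ 57) || (65 ≤ o && o ≤ 70) || (97 ≤ o && o ≤ 102)

-- the module-level tables _UPPER/_LOWER/_DIGIT, indexed at oc < 128: the comprehensions
-- evaluate to exactly these code-point range tests ('0'-'9' are the only chars < 128 with isdigit()).
def tblUpperA (oc : Nat) : Bool := 65 ≤ oc && oc ≤ 90
def tblLowerA (oc : Nat) : Bool := 97 ≤ oc && oc ≤ 122
def tblDigitA (oc : Nat) : Bool := 48 ≤ oc && oc ≤ 57

-- _is_ident_part_fast(ch)
def isIdentPartFastA (c : Char) : Bool :=
  let oc := c.toNat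
  if oc < 128 then tblUpperA oc || tblLowerA oc || tblDigitA oc || c = '_' || c = '$'
  else false

-- the while-loop of _read_ident, fuel-indexed ((n - j) shrinks by ≥ 1 per iteration)
def identLoopA (cs : List Char) (n : Int) : Nat → Int → Int
  | 0, j => j
  | fuel + 1, j =>
    if j < n then
      match PySem.List.pyGet? cs j with
      | none => j      -- code[j] raises IndexError here (excluded by Pre_)
      | some ch =>
        if ch = '\\' then
          if j + 5 < n ∧ PySem.List.pyGet? cs (j + 1) = some 'u'
             ∧ (PySem.List.slice cs (some (j + 2)) (some (j + 6))).all isHexA then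
            identLoopA cs n fuel (j + 6)
          else j       -- break (if code[j+1] would raise, that input is outside Pre_)
        else
          if isIdentPartFastA ch then identLoopA cs n fuel (j + 1) else j
    else j

def read_ident_py (code : String) (i : Int) (n : Int) : String × Int :=
  let j : Int := identLoopA code.toList n (n - i).toNat i
  (PySem.Str.slice code (some i) (some j), j)

-- ===== PORT B =====

-- the regex classes, as the engine compares them: by code point
def isHexB (c : Char) : Bool :=
  let o := c.toNat
  (48 ≤ o && o ≤ 57) || (65 ≤ o && o ≤ 70) || (97 ≤ o && o ≤ 102)

def isIdentClassB (c : Char) : Bool :=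
  let o := c.toNat
  (65 ≤ o && o ≤ 90) || (97 ≤ o && o ≤ 122) || (48 ≤ o && o ≤ 57) || o = 95 || o = 36

-- the greedy star of _IDENT_RE from position j, never reading at or past endpos e
-- (the two alternation branches have disjoint first characters, so greedy matching
-- is exactly this maximal-munch scan); fuel-indexed, e fuel suffices
def reStarB (cs : List Char) (e : Nat) : Nat → Nat → Nat
  | 0, j => j
  | fuel + 1, j =>
    if j < e then
      match cs[j]? with
      | none => j     -- unreachable: e ≤ cs.length
      | some c =>
        if isIdentClassB c then reStarB cs e fuel (j + 1)
        else if c = '\\' ∧ j + 6 ≤ e ∧ cs[j + 1]? = some 'u'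
               ∧ cs[j + 2]?.any isHexB ∧ cs[j + 3]?.any isHexB
               ∧ cs[j + 4]?.any isHexB ∧ cs[j + 5]?.any isHexB then
          reStarB cs e fuel (j + 6)
        else j
    else j

def read_ident_py_alt (code : String) (i : Int) (n : Int) : String × Int :=
  if n ≤ i then ("", i)    -- empty scan window (re.match would clamp the positions)
  else
  let cs := code.toList
  let L := cs.length
  let p : Nat := min (max i 0).toNat L     -- re.match clamps pos into [0, len]
  let e : Nat := min (max n 0).toNat L     -- ... and endpos likewise
  let j : Nat := reStarB cs e e p          -- j = m.end()
  (PySem.Str.slice code (some i) (some (j : Int)), (j : Int))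

-- ===== PRECONDITION & SPEC =====
-- Pre_ excludes non-empty scan windows reaching past either end of the string (i < 0 or
-- len < n, with i < n), where A either raises IndexError mid-scan or scans with Python's
-- negative-index wraparound while B's regex clamps the positions — two equally accidental
-- behaviours no caller specifies.
def Pre_read_ident_py (code : String) (i : Int) (n : Int) : Prop :=
  n ≤ i ∨ (0 ≤ i ∧ i ≤ PySem.Str.len code ∧ n ≤ PySem.Str.len code)
instance (code : String) (i : Int) (n : Int) : Decidable (Pre_read_ident_py code i n) := by
  unfold Pre_read_ident_py; infer_instance

def pvWitness_read_ident_py : String × Int × Int := ("ab\\u0042cd!", 0, 11)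

def Spec_read_ident_py (code : String) (i : Int) (n : Int) (out : String × Int) : Prop := out = read_ident_py_alt code i n
instance (code : String) (i : Int) (n : Int) (out : String × Int) : Decidable (Spec_read_ident_py code i n out) := by unfold Spec_read_ident_py; infer_instance

-- ===== CLAIM (what is proved, stated in full; the proofs are below) =====
def Claim_equal_read_ident_py : Prop := ∀ (code : String) (i : Int) (n : Int), Dom_read_ident_py code i n → Pre_read_ident_py code i n → Spec_read_ident_py code i n (read_ident_py code i n)

-- ===== LEMMAS AND PROOFS =====

theorem char_eq_iff_toNat (c d : Char) : c = d ↔ c.toNat = d.toNat := by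
  constructor
  · rintro rfl; rfl
  · intro h; exact Char.ext (UInt32.toNat_inj.mp h)

theorem identClass_eq (c : Char) : isIdentPartFastA c = isIdentClassB c := by
  have h95 : ('_' : Char).toNat = 95 := rfl
  have h36 : ('$' : Char).toNat = 36 := rfl
  simp only [isIdentPartFastA, isIdentClassB, tblUpperA, tblLowerA, tblDigitA,
    char_eq_iff_toNat, h95, h36]
  by_cases h : c.toNat < 128
  · simp only [h, if_true]
  · rw [Bool.eq_iff_iff]
    simp only [h, if_false, Bool.false_eq_true, false_iff, Bool.or_eq_true,
      Bool.and_eq_true, decide_eq_true_eq]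
    omega

theorem identClass_backslash : isIdentClassB '\\' = false := by decide

theorem hexA_eq_hexB : isHexA = isHexB := rfl

theorem reStarB_stop (cs : List Char) (e : Nat) (fuel j : Nat) (h : e ≤ j) :
    reStarB cs e fuel j = j := by
  cases fuel <;> simp [reStarB, Nat.not_lt.mpr h]

-- the fuel is irrelevant once it covers e - j
theorem reStarB_fuel (cs : List Char) (e : Nat) :
    ∀ f1 f2 j, e - j ≤ f1 → e - j ≤ f2 → reStarB cs e f1 j = reStarB cs e f2 j := by
  intro f1
  induction f1 with
  | zero =>
    intro f2 j h1 _
    have hj : e ≤ j := by omega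
    rw [reStarB_stop cs e 0 j hj, reStarB_stop cs e f2 j hj]
  | succ f ih =>
    intro f2 j h1 h2
    by_cases hj : j < e
    · obtain ⟨f2', rfl⟩ : ∃ f2', f2 = f2' + 1 := ⟨f2 - 1, by omega⟩
      simp only [reStarB, hj, if_true]
      cases hg : cs[j]? with
      | none => rfl
      | some c =>
        dsimp only
        split_ifs with hcl hesc
        · exact ih f2' (j + 1) (by omega) (by omega)
        · exact ih f2' (j + 6) (by omega) (by omega)
        · rfl
    · have hj' : e ≤ j := by omega
      rw [reStarB_stop cs e (f + 1) j hj', reStarB_stop cs e f2 j hj']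

-- the hex window of the escape: slice-and-all equals the four positional tests
theorem hex4_eq (cs : List Char) (m : Nat) (h : m + 6 ≤ cs.length) :
    ((PySem.List.slice cs (some ((m : Int) + 2)) (some ((m : Int) + 6))).all isHexA = true)
      ↔ (cs[m + 2]?.any isHexB ∧ cs[m + 3]?.any isHexB
          ∧ cs[m + 4]?.any isHexB ∧ cs[m + 5]?.any isHexB) := by
  have hc2 : (m : Int) + 2 = ((m + 2 : Nat) : Int) := by push_cast; ring
  have hc6 : (m : Int) + 6 = ((m + 6 : Nat) : Int) := by push_cast; ring
  rw [hc2, hc6, PySem.List.slice_natCast]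
  have h4 : (m + 6) - (m + 2) = 4 := by omega
  rw [h4]
  have hlen : 4 ≤ (cs.drop (m + 2)).length := by
    rw [List.length_drop]; omega
  rcases hl : cs.drop (m + 2) with _ | ⟨a, _ | ⟨b, _ | ⟨c, _ | ⟨d, t⟩⟩⟩⟩ <;>
    rw [hl] at hlen <;> simp at hlen
  have g : ∀ k, cs[m + 2 + k]? = (a :: b :: c :: d :: t)[k]? := by
    intro k; rw [← hl, List.getElem?_drop]
  have g0 : cs[m + 2]? = some a := g 0
  have g1 : cs[m + 3]? = some b := by have := g 1; rwa [show m + 2 + 1 = m + 3 from by omega] at this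
  have g2 : cs[m + 4]? = some c := by have := g 2; rwa [show m + 2 + 2 = m + 4 from by omega] at this
  have g3 : cs[m + 5]? = some d := by have := g 3; rwa [show m + 2 + 3 = m + 5 from by omega] at this
  rw [g0, g1, g2, g3, hexA_eq_hexB]
  simp [List.all, Bool.and_eq_true]

-- core: A's while-loop equals B's bounded greedy regex scan (same fuel), for e ≤ len
theorem loop_eq (cs : List Char) (e : Nat) (he : e ≤ cs.length) :
    ∀ fuel (j : Nat), identLoopA cs (e : Int) fuel (j : Int) = ((reStarB cs e fuel j : Nat) : Int) := by
  intro fuel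
  induction fuel with
  | zero => intro j; simp [identLoopA, reStarB]
  | succ f ih =>
    intro j
    by_cases hj : j < e
    · have hjI : (j : Int) < (e : Int) := by exact_mod_cast hj
      have hjlen : j < cs.length := by omega
      have hget : PySem.List.pyGet? cs (j : Int) = some cs[j] := by
        simp [PySem.List.pyGet?_natCast, List.getElem?_eq_getElem hjlen]
      have hgetB : cs[j]? = some cs[j] := List.getElem?_eq_getElem hjlen
      simp only [identLoopA, reStarB, hj, hjI, if_true, hget, hgetB]
      by_cases hc : cs[j] = '\\'
      · rw [hc, identClass_backslash]
        simp only [Bool.false_eq_true, if_false, if_true]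
        by_cases hwin : j + 6 ≤ e
        · have hwinI : (j : Int) + 5 < (e : Int) := by omega
          have hu : PySem.List.pyGet? cs ((j : Int) + 1) = cs[j + 1]? := by
            rw [show (j : Int) + 1 = ((j + 1 : Nat) : Int) from by push_cast; ring,
              PySem.List.pyGet?_natCast]
          have hhex := hex4_eq cs j (by omega)
          by_cases hesc : cs[j + 1]? = some 'u' ∧ cs[j + 2]?.any isHexB ∧ cs[j + 3]?.any isHexB
              ∧ cs[j + 4]?.any isHexB ∧ cs[j + 5]?.any isHexB
          · rw [if_pos ⟨hwinI, by rw [hu]; exact hesc.1, hhex.mpr hesc.2⟩,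
              if_pos (show _ ∧ _ from ⟨by simp, hwin, hesc⟩),
              show (j : Int) + 6 = ((j + 6 : Nat) : Int) from by push_cast; ring]
            exact ih (j + 6)
          · rw [if_neg (by rintro ⟨-, h2, h3⟩; exact hesc ⟨by rw [← hu]; exact h2, hhex.mp h3⟩),
              if_neg (by rintro ⟨-, -, rest⟩; exact hesc rest)]
        · rw [if_neg (by rintro ⟨hw, -, -⟩; exact hwin (by omega)),
            if_neg (by rintro ⟨-, hw, -⟩; exact hwin hw)]
      · rw [if_neg hc, identClass_eq]
        by_cases hid : isIdentClassB cs[j] = true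
        · rw [if_pos hid, if_pos hid,
            show (j : Int) + 1 = ((j + 1 : Nat) : Int) from by push_cast; ring]
          exact ih (j + 1)
        · rw [if_neg hid, if_neg hid, if_neg]
          rintro ⟨hbs, -⟩; exact hc hbs
    · have hjI : ¬ ((j : Int) < (e : Int)) := by exact_mod_cast hj
      simp [identLoopA, reStarB, hj, hjI]

-- ===== VERDICT (by name: the statement is the Claim_ definition above) =====
theorem slice_empty_window (code : String) (i : Int) :
    PySem.Str.slice code (some i) (some i) = "" := by
  simp only [PySem.Str.slice, PySem.Chars.slice_eq_listSlice]
  have h : (PySem.List.slice code.toList (some i) (some i)).length = 0 := by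
    simp [PySem.List.length_slice]
  simp [List.eq_nil_of_length_eq_zero h]

theorem read_ident_py_spec : Claim_equal_read_ident_py := by
  intro code i n _ hpre
  unfold Spec_read_ident_py read_ident_py read_ident_py_alt
  dsimp only
  by_cases hcase : n ≤ i
  · -- empty window: A's loop gets fuel 0 and returns j = i at once
    rw [if_pos hcase, show (n - i).toNat = 0 from by omega]
    simp [identLoopA, slice_empty_window]
  · -- real window: Pre_ gives 0 ≤ i ≤ len and n ≤ len; both scans are the same greedy walk
    obtain ⟨h0, hiL, hnL⟩ : 0 ≤ i ∧ i ≤ PySem.Str.len code ∧ n ≤ PySem.Str.len code := by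
      rcases hpre with h | h
      · omega
      · exact h
    rw [PySem.Str.len_eq] at hiL hnL
    rw [if_neg hcase]
    have hiN : ((i.toNat : Nat) : Int) = i := Int.toNat_of_nonneg h0
    have hnI : ((n.toNat : Nat) : Int) = n := Int.toNat_of_nonneg (by omega)
    have key : identLoopA code.toList n (n - i).toNat i
        = ((reStarB code.toList (min (max n 0).toNat code.toList.length)
              (min (max n 0).toNat code.toList.length)
              (min (max i 0).toNat code.toList.length) : Nat) : Int) := by
      rw [show min (max i 0).toNat code.toList.length = i.toNat from by omega,
        show min (max n 0).toNat code.toList.length = n.toNat from by omega]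
      have hA := loop_eq code.toList n.toNat (by omega) (n - i).toNat i.toNat
      rw [hiN, hnI] at hA
      rw [hA, reStarB_fuel code.toList n.toNat ((n - i).toNat) n.toNat i.toNat
        (by omega) (by omega)]
    rw [key]
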